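-- pv_equiv track=rewrite | github.com/YHLEE9753/Algorithms | out/production/BOJ/Python/15_DP1(Python)/2_9148.py | fi1
-- ===== SOURCE A (Python) =====
-- def fi1(a:int,b:int,c:int)->int:
--     if a<=0 or b<=0 or c<=0:
--         return 1
--     if a>20 or b>20 or c>20:
--         return fi1(20,20,20)
--     if memo[a][b][c]:
--         return memo[a][b][c]
--     if a<b and b<c:
--         memo[a][b][c] = fi1(a,b,c-1) + fi1(a,b-1,c-1) - fi1(a, b-1, c)
--         return memo[a][b][c]
--     else:
--         memo[a][b][c] = fi1(a-1,b,c) + fi1(a-1,b-1,c) + fi1(a-1,b,c-1) - fi1(a-1,b-1,c-1)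
--         return memo[a][b][c]
--
-- memo = [[[0]*(21) for _ in range(21)]for _ in range(21)]
-- ===== SOURCE B (Python) =====
-- def _build():
--     t = [[[1] * 21 for _ in range(21)] for _ in range(21)]
--     for a in range(1, 21):
--         for b in range(1, 21):
--             for c in range(1, 21):
--                 if a < b and b < c:
--                     t[a][b][c] = t[a][b][c - 1] + t[a][b - 1][c - 1] - t[a][b - 1][c]
--                 else:
--                     t[a][b][c] = t[a - 1][b][c] + t[a - 1][b - 1][c] + t[a - 1][b][c - 1] - t[a - 1][b - 1][c - 1]
--     return t
--
-- _TABLE = _build()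
--
-- def fi1(a: int, b: int, c: int) -> int:
--     if a <= 0 or b <= 0 or c <= 0:
--         return 1
--     if a > 20 or b > 20 or c > 20:
--         return _TABLE[20][20][20]
--     return _TABLE[a][b][c]
-- ===== Notes on version B (the rewrite author's own statement) =====
-- stated objective: alternative
-- what changed: Replaces the memoized recursion with a bottom-up 21x21x21 table filled once in ascending index order; the public function becomes pure guard checks plus a table lookup.
import Mathlib
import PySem

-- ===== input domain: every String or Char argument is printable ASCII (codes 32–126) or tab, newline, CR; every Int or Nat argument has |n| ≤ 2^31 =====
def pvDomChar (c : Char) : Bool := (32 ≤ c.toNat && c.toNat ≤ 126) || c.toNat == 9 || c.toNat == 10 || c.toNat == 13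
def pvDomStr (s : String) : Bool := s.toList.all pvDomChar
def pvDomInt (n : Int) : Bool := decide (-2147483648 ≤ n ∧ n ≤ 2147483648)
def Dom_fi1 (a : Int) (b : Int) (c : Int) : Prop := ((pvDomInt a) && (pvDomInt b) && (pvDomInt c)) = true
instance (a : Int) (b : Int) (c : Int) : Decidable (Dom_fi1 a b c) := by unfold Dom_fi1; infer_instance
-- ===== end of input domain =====

-- B replaces A's memoized recursion by a bottom-up 21x21x21 table filled once in ascending index order;
-- fi1_alt is then guard checks plus a table lookup (objective: alternative).
-- A's Python mutates a module-level memo; its entries are call-order independent, so the port threads a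
-- fresh memo per top-level call (the return value is identical).

-- shared 3-d list indexing helpers; all indices used are in 0..20, where this is exact Python list indexing
def gT (t : List (List (List Int))) (a b c : Nat) : Int :=
  ((t.getD a []).getD b []).getD c 0

def sT (t : List (List (List Int))) (a b c : Nat) (v : Int) : List (List (List Int)) :=
  t.set a ((t.getD a []).set b (((t.getD a []).getD b []).set c v))

-- ===== PORT A =====
def getm (m : List (List (List Int))) (a b c : Int) : Int := gT m a.toNat b.toNat c.toNat

def setm (m : List (List (List Int))) (a b c : Int) (v : Int) : List (List (List Int)) :=
  sT m a.toNat b.toNat c.toNat v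

-- memo = [[[0]*21 for _ in range(21)] for _ in range(21)]
def memo0 : List (List (List Int)) := List.replicate 21 (List.replicate 21 (List.replicate 21 (0:Int)))

-- the memoized recursion, threading the memo as state; the Nat fuel is ONLY a structural
-- totality guard (fi1go_correct below shows any fuel > 61 is never exhausted), not part of A's logic
def fi1go (fuel : Nat) (a : Int) (b : Int) (c : Int) (m : List (List (List Int))) :
    Int × List (List (List Int)) :=
  match fuel with
  | 0 => (0, m)
  | fuel+1 =>
    if a ≤ 0 ∨ b ≤ 0 ∨ c ≤ 0 then (1, m)
    else if 20 < a ∨ 20 < b ∨ 20 < c then fi1go fuel 20 20 20 m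
    else if getm m a b c ≠ 0 then (getm m a b c, m)
    else if a < b ∧ b < c then
      let r1 := fi1go fuel a b (c-1) m
      let r2 := fi1go fuel a (b-1) (c-1) r1.2
      let r3 := fi1go fuel a (b-1) c r2.2
      let v := r1.1 + r2.1 - r3.1
      (v, setm r3.2 a b c v)
    else
      let r1 := fi1go fuel (a-1) b c m
      let r2 := fi1go fuel (a-1) (b-1) c r1.2
      let r3 := fi1go fuel (a-1) b (c-1) r2.2
      let r4 := fi1go fuel (a-1) (b-1) (c-1) r3.2
      let v := r1.1 + r2.1 + r3.1 - r4.1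
      (v, setm r4.2 a b c v)

def fi1 (a : Int) (b : Int) (c : Int) : Int := (fi1go 1000 a b c memo0).1

-- ===== PORT B =====
-- t[a][b][c] = two-branch recurrence, for fixed a, b and running c (innermost loop body)
def cbody (a b : Nat) (t : List (List (List Int))) (c : Nat) : List (List (List Int)) :=
  sT t a b c (if a < b ∧ b < c then
      gT t a b (c-1) + gT t a (b-1) (c-1) - gT t a (b-1) c
    else
      gT t (a-1) b c + gT t (a-1) (b-1) c + gT t (a-1) b (c-1) - gT t (a-1) (b-1) (c-1))

-- for c in range(1, 21)
def bbody (a : Nat) (t : List (List (List Int))) (b : Nat) : List (List (List Int)) :=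
  (List.range' 1 20).foldl (cbody a b) t

-- for b in range(1, 21)
def abody (t : List (List (List Int))) (a : Nat) : List (List (List Int)) :=
  (List.range' 1 20).foldl (bbody a) t

-- _build(): start from all-ones 21x21x21, then for a in range(1, 21): fill
def buildT : List (List (List Int)) :=
  (List.range' 1 20).foldl abody (List.replicate 21 (List.replicate 21 (List.replicate 21 (1:Int))))

def tableB : List (List (List Int)) := buildT

def fi1_alt (a : Int) (b : Int) (c : Int) : Int :=
  if a ≤ 0 ∨ b ≤ 0 ∨ c ≤ 0 then 1
  else if 20 < a ∨ 20 < b ∨ 20 < c then gT tableB 20 20 20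
  else gT tableB a.toNat b.toNat c.toNat

-- ===== PRECONDITION & SPEC =====
def Spec_fi1 (a : Int) (b : Int) (c : Int) (out : Int) : Prop := out = fi1_alt a b c
instance (a : Int) (b : Int) (c : Int) (out : Int) : Decidable (Spec_fi1 a b c out) := by unfold Spec_fi1; infer_instance

-- ===== CLAIM (what is proved, stated in full; the proofs are below) =====
def Claim_equal_fi1 : Prop := ∀ (a : Int) (b : Int) (c : Int), Dom_fi1 a b c → Spec_fi1 a b c (fi1 a b c)

-- ===== LEMMAS AND PROOFS =====

-- the mathematical recursion both programs compute (proof-only; never evaluated)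
def W (a b c : Nat) : Int :=
  if a = 0 ∨ b = 0 ∨ c = 0 then 1
  else if a < b ∧ b < c then W a b (c-1) + W a (b-1) (c-1) - W a (b-1) c
  else W (a-1) b c + W (a-1) (b-1) c + W (a-1) b (c-1) - W (a-1) (b-1) (c-1)
termination_by a + b + c
decreasing_by all_goals omega

theorem W_base (a b c : Nat) (h : a = 0 ∨ b = 0 ∨ c = 0) : W a b c = 1 := by
  rw [W]; simp [h]

theorem W_rec (a b c : Nat) (ha : 1 ≤ a) (hb : 1 ≤ b) (hc : 1 ≤ c) :
    W a b c = if a < b ∧ b < c then W a b (c-1) + W a (b-1) (c-1) - W a (b-1) c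
      else W (a-1) b c + W (a-1) (b-1) c + W (a-1) b (c-1) - W (a-1) (b-1) (c-1) := by
  rw [W]; rw [if_neg (by omega)]

-- shape of the 21x21x21 tables
def Sh (t : List (List (List Int))) : Prop :=
  t.length = 21 ∧ (∀ i, i < 21 → (t.getD i []).length = 21) ∧
    (∀ i j, i < 21 → j < 21 → ((t.getD i []).getD j []).length = 21)

theorem getD_set_eq {α : Type} (l : List α) (i : Nat) (x d : α) (h : i < l.length) :
    (l.set i x).getD i d = x := by
  simp [List.getD_eq_getElem?_getD, h]

theorem getD_set_ne {α : Type} (l : List α) (i j : Nat) (x d : α) (h : i ≠ j) :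
    (l.set i x).getD j d = l.getD j d := by
  simp [List.getD_eq_getElem?_getD, h]

theorem Sh_sT (t : List (List (List Int))) (a b c : Nat) (v : Int) (hsh : Sh t)
    (ha : a < 21) (hb : b < 21) : Sh (sT t a b c v) := by
  obtain ⟨h1, h2, h3⟩ := hsh
  refine ⟨by simp [sT, h1], ?_, ?_⟩
  · intro i hi
    by_cases hia : a = i
    · subst hia
      rw [sT, getD_set_eq _ _ _ _ (by omega)]
      simpa [List.getD_eq_getElem?_getD] using h2 a ha
    · rw [sT, getD_set_ne _ _ _ _ _ hia, h2 i hi]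
  · intro i j hi hj
    by_cases hia : a = i
    · subst hia
      rw [sT, getD_set_eq _ _ _ _ (by omega)]
      by_cases hjb : b = j
      · subst hjb
        rw [getD_set_eq _ _ _ _ (by rw [h2 a ha]; omega)]
        simpa [List.getD_eq_getElem?_getD] using h3 a b ha hb
      · rw [getD_set_ne _ _ _ _ _ hjb, h3 a j ha hj]
    · rw [sT, getD_set_ne _ _ _ _ _ hia, h3 i j hi hj]

theorem gT_sT (t : List (List (List Int))) (a b c : Nat) (v : Int) (i j k : Nat) (hsh : Sh t)
    (ha : a < 21) (hb : b < 21) (hc : c < 21) :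
    gT (sT t a b c v) i j k = if i = a ∧ j = b ∧ k = c then v else gT t i j k := by
  obtain ⟨h1, h2, h3⟩ := hsh
  by_cases hia : a = i
  · subst hia
    rw [gT, sT, getD_set_eq _ _ _ _ (by omega)]
    by_cases hjb : b = j
    · subst hjb
      rw [getD_set_eq _ _ _ _ (by rw [h2 a ha]; omega)]
      by_cases hkc : c = k
      · subst hkc
        rw [getD_set_eq _ _ _ _ (by rw [h3 a b ha hb]; omega)]
        simp
      · rw [getD_set_ne _ _ _ _ _ hkc, if_neg (by tauto), gT]
    · rw [getD_set_ne _ _ _ _ _ hjb, if_neg (by tauto), gT]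
  · rw [gT, sT, getD_set_ne _ _ _ _ _ hia, if_neg (by tauto), gT]

theorem gT_replicate (x : Int) (i j k : Nat) (hi : i < 21) (hj : j < 21) (hk : k < 21) :
    gT (List.replicate 21 (List.replicate 21 (List.replicate 21 x))) i j k = x := by
  unfold gT
  simp only [List.getD_eq_getElem?_getD, List.getElem?_replicate, hi, hj, hk, if_true,
    Option.getD_some]

theorem Sh_replicate (x : Int) :
    Sh (List.replicate 21 (List.replicate 21 (List.replicate 21 x))) := by
  refine ⟨by simp, ?_, ?_⟩
  · intro i hi
    simp only [List.getD_eq_getElem?_getD, List.getElem?_replicate, hi, if_true,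
      Option.getD_some, List.length_replicate]
  · intro i j hi hj
    simp only [List.getD_eq_getElem?_getD, List.getElem?_replicate, hi, hj, if_true,
      Option.getD_some, List.length_replicate]

-- loop invariant: cells already filled hold W, the rest still hold the initial 1
def pvCond (a b C i j k : Nat) : Prop :=
  i < a ∨ j = 0 ∨ k = 0 ∨ (i = a ∧ j < b) ∨ (i = a ∧ j = b ∧ k ≤ C)

def pvInv (a b C : Nat) (t : List (List (List Int))) : Prop :=
  Sh t ∧ ∀ i j k, i < 21 → j < 21 → k < 21 →
    (pvCond a b C i j k → gT t i j k = W i j k) ∧ (¬ pvCond a b C i j k → gT t i j k = 1)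

theorem pvInv_transfer (a b C a' b' C' : Nat) (t : List (List (List Int)))
    (h : ∀ i j k, i < 21 → j < 21 → k < 21 → (pvCond a b C i j k ↔ pvCond a' b' C' i j k))
    (ht : pvInv a b C t) : pvInv a' b' C' t := by
  refine ⟨ht.1, fun i j k hi hj hk => ⟨fun hc => ?_, fun hc => ?_⟩⟩
  · exact (ht.2 i j k hi hj hk).1 ((h i j k hi hj hk).2 hc)
  · exact (ht.2 i j k hi hj hk).2 (fun hx => hc ((h i j k hi hj hk).1 hx))

theorem cstep (a b c : Nat) (t : List (List (List Int)))
    (ha : 1 ≤ a) (ha' : a ≤ 20) (hb : 1 ≤ b) (hb' : b ≤ 20) (hc : 1 ≤ c) (hc' : c ≤ 20)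
    (ht : pvInv a b (c-1) t) : pvInv a b c (cbody a b t c) := by
  obtain ⟨hsh, hg⟩ := ht
  have hval : (if a < b ∧ b < c then
      gT t a b (c-1) + gT t a (b-1) (c-1) - gT t a (b-1) c
    else
      gT t (a-1) b c + gT t (a-1) (b-1) c + gT t (a-1) b (c-1) - gT t (a-1) (b-1) (c-1)) = W a b c := by
    have g1 : gT t a b (c-1) = W a b (c-1) :=
      (hg a b (c-1) (by omega) (by omega) (by omega)).1 (by unfold pvCond; omega)
    have g2 : gT t a (b-1) (c-1) = W a (b-1) (c-1) :=
      (hg a (b-1) (c-1) (by omega) (by omega) (by omega)).1 (by unfold pvCond; omega)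
    have g3 : gT t a (b-1) c = W a (b-1) c :=
      (hg a (b-1) c (by omega) (by omega) (by omega)).1 (by unfold pvCond; omega)
    have g4 : gT t (a-1) b c = W (a-1) b c :=
      (hg (a-1) b c (by omega) (by omega) (by omega)).1 (by unfold pvCond; omega)
    have g5 : gT t (a-1) (b-1) c = W (a-1) (b-1) c :=
      (hg (a-1) (b-1) c (by omega) (by omega) (by omega)).1 (by unfold pvCond; omega)
    have g6 : gT t (a-1) b (c-1) = W (a-1) b (c-1) :=
      (hg (a-1) b (c-1) (by omega) (by omega) (by omega)).1 (by unfold pvCond; omega)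
    have g7 : gT t (a-1) (b-1) (c-1) = W (a-1) (b-1) (c-1) :=
      (hg (a-1) (b-1) (c-1) (by omega) (by omega) (by omega)).1 (by unfold pvCond; omega)
    rw [g1, g2, g3, g4, g5, g6, g7, W_rec a b c ha hb hc]
  refine ⟨Sh_sT _ _ _ _ _ hsh (by omega) (by omega), fun i j k hi hj hk => ?_⟩
  rw [cbody, hval, gT_sT t a b c _ i j k hsh (by omega) (by omega) (by omega)]
  by_cases he : i = a ∧ j = b ∧ k = c
  · rw [if_pos he]
    refine ⟨fun _ => ?_, fun hcnd => absurd ?_ hcnd⟩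
    · obtain ⟨e1, e2, e3⟩ := he; subst e1; subst e2; subst e3; rfl
    · obtain ⟨e1, e2, e3⟩ := he; subst e1; subst e2; subst e3; unfold pvCond; omega
  · rw [if_neg he]
    refine ⟨fun hcnd => ?_, fun hcnd => ?_⟩
    · exact (hg i j k hi hj hk).1 (by revert hcnd he; unfold pvCond; omega)
    · exact (hg i j k hi hj hk).2 (fun hx => hcnd (by revert hx; unfold pvCond; omega))

theorem cfold (a b : Nat) (ha : 1 ≤ a) (ha' : a ≤ 20) (hb : 1 ≤ b) (hb' : b ≤ 20) :
    ∀ n, n ≤ 20 → ∀ t, pvInv a b 0 t → pvInv a b n ((List.range' 1 n).foldl (cbody a b) t) := by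
  intro n
  induction n with
  | zero => intro _ t ht; simpa using ht
  | succ m ih =>
    intro hm t ht
    rw [List.range'_concat, List.foldl_append]
    simp only [List.foldl_cons, List.foldl_nil]
    have e : 1 + 1 * m = m + 1 := by omega
    rw [e]
    have h1 := ih (by omega) t ht
    have h1' : pvInv a b ((m+1)-1) ((List.range' 1 m).foldl (cbody a b) t) := by
      simpa using h1
    exact cstep a b (m+1) _ ha ha' hb hb' (by omega) (by omega) h1'

theorem bfold (a : Nat) (ha : 1 ≤ a) (ha' : a ≤ 20) :
    ∀ n, n ≤ 20 → ∀ t, pvInv a 0 20 t → pvInv a n 20 ((List.range' 1 n).foldl (bbody a) t) := by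
  intro n
  induction n with
  | zero => intro _ t ht; simpa using ht
  | succ m ih =>
    intro hm t ht
    rw [List.range'_concat, List.foldl_append]
    simp only [List.foldl_cons, List.foldl_nil]
    have e : 1 + 1 * m = m + 1 := by omega
    rw [e]
    have h1 := ih (by omega) t ht
    have h2 : pvInv a (m+1) 0 ((List.range' 1 m).foldl (bbody a) t) := by
      refine pvInv_transfer a m 20 a (m+1) 0 _ (fun i j k hi hj hk => ?_) h1
      unfold pvCond; omega
    exact cfold a (m+1) ha ha' (by omega) (by omega) 20 (by omega) _ h2

theorem afold :
    ∀ n, n ≤ 20 → ∀ t, pvInv 0 20 20 t → pvInv n 20 20 ((List.range' 1 n).foldl abody t) := by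
  intro n
  induction n with
  | zero => intro _ t ht; simpa using ht
  | succ m ih =>
    intro hm t ht
    rw [List.range'_concat, List.foldl_append]
    simp only [List.foldl_cons, List.foldl_nil]
    have e : 1 + 1 * m = m + 1 := by omega
    rw [e]
    have h1 := ih (by omega) t ht
    have h2 : pvInv (m+1) 0 20 ((List.range' 1 m).foldl abody t) := by
      refine pvInv_transfer m 20 20 (m+1) 0 20 _ (fun i j k hi hj hk => ?_) h1
      unfold pvCond; omega
    exact bfold (m+1) (by omega) (by omega) 20 (by omega) _ h2

theorem pvInv_init : pvInv 0 20 20 (List.replicate 21 (List.replicate 21 (List.replicate 21 (1:Int)))) := by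
  refine ⟨Sh_replicate 1, fun i j k hi hj hk => ⟨fun hc => ?_, fun _ => gT_replicate 1 i j k hi hj hk⟩⟩
  rw [gT_replicate 1 i j k hi hj hk, W_base i j k (by revert hc; unfold pvCond; omega)]

theorem tableB_correct (i j k : Nat) (hi : i < 21) (hj : j < 21) (hk : k < 21) :
    gT tableB i j k = W i j k := by
  have h := afold 20 (by omega) _ pvInv_init
  unfold tableB buildT
  exact (h.2 i j k hi hj hk).1 (by unfold pvCond; omega)

-- B's function in terms of W
theorem alt_eq (a b c : Int) (ha0 : 0 ≤ a) (ha : a ≤ 20) (hb0 : 0 ≤ b) (hb : b ≤ 20)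
    (hc0 : 0 ≤ c) (hc : c ≤ 20) : fi1_alt a b c = W a.toNat b.toNat c.toNat := by
  unfold fi1_alt
  split_ifs with h h'
  · rw [W_base _ _ _ (by omega)]
  · omega
  · exact tableB_correct _ _ _ (by omega) (by omega) (by omega)

-- memo invariant: every nonzero entry already holds the corresponding W value
def ValidM (m : List (List (List Int))) : Prop :=
  Sh m ∧ ∀ i j k : Int, getm m i j k ≠ 0 →
    getm m i j k = W i.toNat j.toNat k.toNat

theorem getD_replicate' {α : Type} (n : Nat) (x d : α) (i : Nat) :
    (List.replicate n x).getD i d = if i < n then x else d := by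
  rw [List.getD_eq_getElem?_getD, List.getElem?_replicate]
  split_ifs <;> rfl

theorem gT_memo0 (i j k : Nat) : gT memo0 i j k = 0 := by
  unfold gT memo0
  rw [getD_replicate']
  split_ifs with h1
  · rw [getD_replicate']
    split_ifs with h2
    · rw [getD_replicate']
      split_ifs with h3 <;> rfl
    · rfl
  · rfl

theorem validM_memo0 : ValidM memo0 :=
  ⟨Sh_replicate 0, fun i j k h => absurd (gT_memo0 i.toNat j.toNat k.toNat) h⟩

theorem valid_setm (m : List (List (List Int))) (a b c : Int) (v : Int)
    (ha0 : 0 ≤ a) (ha : a ≤ 20) (hb0 : 0 ≤ b) (hb : b ≤ 20) (hc0 : 0 ≤ c) (hc : c ≤ 20)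
    (hm : ValidM m) (hv : v = W a.toNat b.toNat c.toNat) : ValidM (setm m a b c v) := by
  obtain ⟨hsh, hval⟩ := hm
  refine ⟨Sh_sT _ _ _ _ _ hsh (by omega) (by omega), fun i j k h => ?_⟩
  rw [getm, setm, gT_sT m _ _ _ _ _ _ _ hsh (by omega) (by omega) (by omega)] at h ⊢
  by_cases he : i.toNat = a.toNat ∧ j.toNat = b.toNat ∧ k.toNat = c.toNat
  · rw [if_pos he] at h ⊢
    obtain ⟨e1, e2, e3⟩ := he
    rw [hv, e1, e2, e3]
  · rw [if_neg he] at h ⊢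
    exact hval i j k h

-- fuel measure: an upper bound on the recursion depth of fi1go from (a, b, c)
def pvMu (a : Int) (b : Int) (c : Int) : Nat :=
  if 20 < a ∨ 20 < b ∨ 20 < c then 61 else a.toNat + b.toNat + c.toNat

theorem fi1go_correct : ∀ (fuel : Nat) (a b c : Int) (m : List (List (List Int))),
    pvMu a b c < fuel → ValidM m →
    (fi1go fuel a b c m).1 = fi1_alt a b c ∧ ValidM (fi1go fuel a b c m).2 := by
  intro fuel
  induction fuel with
  | zero => intro a b c m h _; exact absurd h (Nat.not_lt_zero _)
  | succ f ih =>
    intro a b c m hf hm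
    simp only [fi1go]
    split_ifs with h0 h1 h2 h3
    · exact ⟨(by rw [fi1_alt, if_pos h0]), hm⟩
    · have hmu : pvMu 20 20 20 < f := by
        unfold pvMu at hf ⊢
        rw [if_pos h1] at hf
        rw [if_neg (by omega)]
        omega
      obtain ⟨hv, hmem⟩ := ih 20 20 20 m hmu hm
      refine ⟨?_, hmem⟩
      rw [hv, alt_eq 20 20 20 (by omega) (by omega) (by omega) (by omega) (by omega) (by omega),
        fi1_alt, if_neg h0, if_pos h1,
        tableB_correct 20 20 20 (by omega) (by omega) (by omega)]
      rfl
    · refine ⟨?_, hm⟩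
      rw [hm.2 a b c h2,
        alt_eq a b c (by omega) (by omega) (by omega) (by omega) (by omega) (by omega)]
    · have hmu : ∀ x y z : Int, 0 ≤ x → x ≤ 20 → 0 ≤ y → y ≤ 20 → 0 ≤ z → z ≤ 20 →
          x.toNat + y.toNat + z.toNat < a.toNat + b.toNat + c.toNat → pvMu x y z < f := by
        intro x y z _ _ _ _ _ _ hlt
        unfold pvMu at hf ⊢
        rw [if_neg h1] at hf
        rw [if_neg (by omega)]
        omega
      obtain ⟨hv1, hm1⟩ := ih a b (c-1) m
        (hmu a b (c-1) (by omega) (by omega) (by omega) (by omega) (by omega) (by omega) (by omega)) hm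
      obtain ⟨hv2, hm2⟩ := ih a (b-1) (c-1) _
        (hmu a (b-1) (c-1) (by omega) (by omega) (by omega) (by omega) (by omega) (by omega) (by omega)) hm1
      obtain ⟨hv3, hm3⟩ := ih a (b-1) c _
        (hmu a (b-1) c (by omega) (by omega) (by omega) (by omega) (by omega) (by omega) (by omega)) hm2
      have hw : (fi1go f a b (c-1) m).1 + (fi1go f a (b-1) (c-1) (fi1go f a b (c-1) m).2).1 -
          (fi1go f a (b-1) c (fi1go f a (b-1) (c-1) (fi1go f a b (c-1) m).2).2).1
          = W a.toNat b.toNat c.toNat := by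
        rw [hv1, hv2, hv3,
          alt_eq a b (c-1) (by omega) (by omega) (by omega) (by omega) (by omega) (by omega),
          alt_eq a (b-1) (c-1) (by omega) (by omega) (by omega) (by omega) (by omega) (by omega),
          alt_eq a (b-1) c (by omega) (by omega) (by omega) (by omega) (by omega) (by omega),
          W_rec a.toNat b.toNat c.toNat (by omega) (by omega) (by omega), if_pos (by omega)]
        have e1 : (c-1).toNat = c.toNat - 1 := by omega
        have e2 : (b-1).toNat = b.toNat - 1 := by omega
        rw [e1, e2]
      refine ⟨?_, ?_⟩
      · exact hw.trans (alt_eq a b c (by omega) (by omega) (by omega) (by omega) (by omega) (by omega)).symm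
      · exact valid_setm _ a b c _ (by omega) (by omega) (by omega) (by omega) (by omega) (by omega)
          hm3 hw
    · have hmu : ∀ x y z : Int, 0 ≤ x → x ≤ 20 → 0 ≤ y → y ≤ 20 → 0 ≤ z → z ≤ 20 →
          x.toNat + y.toNat + z.toNat < a.toNat + b.toNat + c.toNat → pvMu x y z < f := by
        intro x y z _ _ _ _ _ _ hlt
        unfold pvMu at hf ⊢
        rw [if_neg h1] at hf
        rw [if_neg (by omega)]
        omega
      obtain ⟨hv1, hm1⟩ := ih (a-1) b c m
        (hmu (a-1) b c (by omega) (by omega) (by omega) (by omega) (by omega) (by omega) (by omega)) hm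
      obtain ⟨hv2, hm2⟩ := ih (a-1) (b-1) c _
        (hmu (a-1) (b-1) c (by omega) (by omega) (by omega) (by omega) (by omega) (by omega) (by omega)) hm1
      obtain ⟨hv3, hm3⟩ := ih (a-1) b (c-1) _
        (hmu (a-1) b (c-1) (by omega) (by omega) (by omega) (by omega) (by omega) (by omega) (by omega)) hm2
      obtain ⟨hv4, hm4⟩ := ih (a-1) (b-1) (c-1) _
        (hmu (a-1) (b-1) (c-1) (by omega) (by omega) (by omega) (by omega) (by omega) (by omega) (by omega)) hm3
      have hw : (fi1go f (a-1) b c m).1 + (fi1go f (a-1) (b-1) c (fi1go f (a-1) b c m).2).1 +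
          (fi1go f (a-1) b (c-1) (fi1go f (a-1) (b-1) c (fi1go f (a-1) b c m).2).2).1 -
          (fi1go f (a-1) (b-1) (c-1) (fi1go f (a-1) b (c-1) (fi1go f (a-1) (b-1) c (fi1go f (a-1) b c m).2).2).2).1
          = W a.toNat b.toNat c.toNat := by
        rw [hv1, hv2, hv3, hv4,
          alt_eq (a-1) b c (by omega) (by omega) (by omega) (by omega) (by omega) (by omega),
          alt_eq (a-1) (b-1) c (by omega) (by omega) (by omega) (by omega) (by omega) (by omega),
          alt_eq (a-1) b (c-1) (by omega) (by omega) (by omega) (by omega) (by omega) (by omega),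
          alt_eq (a-1) (b-1) (c-1) (by omega) (by omega) (by omega) (by omega) (by omega) (by omega),
          W_rec a.toNat b.toNat c.toNat (by omega) (by omega) (by omega), if_neg (by omega)]
        have e1 : (c-1).toNat = c.toNat - 1 := by omega
        have e2 : (b-1).toNat = b.toNat - 1 := by omega
        have e3 : (a-1).toNat = a.toNat - 1 := by omega
        rw [e1, e2, e3]
      refine ⟨?_, ?_⟩
      · exact hw.trans (alt_eq a b c (by omega) (by omega) (by omega) (by omega) (by omega) (by omega)).symm
      · exact valid_setm _ a b c _ (by omega) (by omega) (by omega) (by omega) (by omega) (by omega)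
          hm4 hw

-- ===== VERDICT (by name: the statement is the Claim_ definition above) =====
theorem fi1_spec : Claim_equal_fi1 := by
  intro a b c _
  show fi1 a b c = fi1_alt a b c
  refine (fi1go_correct 1000 a b c memo0 ?_ validM_memo0).1
  unfold pvMu
  split_ifs with h
  · omega
  · omega
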